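-- pv_equiv track=rewrite | github.com/vaydr/UniformGAN | generators/uniformgan_helper.py | get_convolutions
-- ===== SOURCE A (Python) =====
-- def convolution(inp, x):
--     (kernel, stride, padding) = x
--     return (inp - kernel + 2*padding)/stride + 1
--
-- class Convolutions():
--     div3 = (4, 2, 0)
--     min4 = (5, 1, 0)
--     odddiv2 = (3, 2, 1) # (x + 1) / 2
--     div2 = (4, 2, 1)
--     same = (3,1,1)
--     tmult2 = (3, 2, 1, 1) # Double
--     toddmult2 = (3, 2, 1, 0) # Double
--     minx = lambda x: (x+1, 1, 0)
--
-- def get_convolutions(inp):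
--     kdiscrim = []
--     kdiscrim.append(Convolutions.same)
--     kgenerator = []
--     while (inp > 1):
--         if (inp % 2 == 1): # ODD
--             kdiscrim.append(Convolutions.odddiv2)
--             kgenerator.append(Convolutions.toddmult2)
--         else:
--             kdiscrim.append(Convolutions.div2)
--             kgenerator.append(Convolutions.tmult2)
--         inp = convolution(inp, kdiscrim[-1])
--     kgenerator.reverse()
--     return kgenerator, kdiscrim
-- ===== SOURCE B (Python) =====
-- def get_convolutions(inp):
--     # Closed form: the loop's trajectory inp -> ceil(inp/2) is floor-halving of
--     # m = inp - 1, so the parity at step k is bit k of inp - 1 (odd step <=> bit 0).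
--     # Decode the binary string of inp - 1 instead of simulating the loop.
--     SAME = (3, 1, 1)
--     ODDDIV2 = (3, 2, 1)
--     DIV2 = (4, 2, 1)
--     TMULT2 = (3, 2, 1, 1)
--     TODDMULT2 = (3, 2, 1, 0)
--     bits = bin(inp - 1)[2:] if inp > 1 else ''   # MSB-first bits of inp-1
--     kgenerator = [TODDMULT2 if b == '0' else TMULT2 for b in bits]
--     kdiscrim = [SAME] + [ODDDIV2 if b == '0' else DIV2 for b in reversed(bits)]
--     return kgenerator, kdiscrim
-- ===== Notes on version B (the rewrite author's own statement) =====
-- stated objective: alternative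
-- what changed: B replaces the halving loop entirely by a closed form: since the loop maps inp to ceil(inp/2), the step parities are exactly the bits of inp-1, so B decodes the binary string bin(inp-1) into the two lists (MSB-first for kgenerator, reversed for kdiscrim) with no trajectory simulation, no convolution formula and no in-place reverse.
import Mathlib
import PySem

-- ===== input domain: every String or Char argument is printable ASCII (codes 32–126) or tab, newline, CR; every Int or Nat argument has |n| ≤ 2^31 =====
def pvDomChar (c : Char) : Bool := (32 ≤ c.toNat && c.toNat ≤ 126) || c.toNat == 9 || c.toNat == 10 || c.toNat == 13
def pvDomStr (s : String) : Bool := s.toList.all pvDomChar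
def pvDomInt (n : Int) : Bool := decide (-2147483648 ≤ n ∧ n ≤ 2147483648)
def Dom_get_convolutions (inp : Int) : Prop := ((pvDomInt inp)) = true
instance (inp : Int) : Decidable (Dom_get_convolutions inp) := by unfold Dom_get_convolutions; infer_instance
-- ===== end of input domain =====

-- B replaces the halving loop by a closed form over the binary digits of inp-1
-- (the loop maps inp to ceil(inp/2), i.e. floor-halves inp-1); objective: alternative.

-- ===== PORT A =====
-- Python's convolution uses float '/'; inside the loop the stride is 2 and the numerator
-- is always even, so Int division is exact there for |inp| ≤ 2^31 (doubles are exact).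
def pyConvolution (inp : Int) (x : Int × Int × Int) : Int :=
  (inp - x.1 + 2 * x.2.2) / x.2.1 + 1

-- the while-loop of A, state = (inp, kdiscrim, kgenerator)
def aLoop (inp : Int) (kd : List (Int × Int × Int)) (kg : List (Int × Int × Int × Int)) :
    (List (Int × Int × Int × Int)) × (List (Int × Int × Int)) :=
  if inp > 1 then
    if inp % 2 == 1 then
      aLoop (pyConvolution inp (3, 2, 1)) (kd ++ [(3, 2, 1)]) (kg ++ [(3, 2, 1, 0)])
    else
      aLoop (pyConvolution inp (4, 2, 1)) (kd ++ [(4, 2, 1)]) (kg ++ [(3, 2, 1, 1)])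
  else (kg.reverse, kd)
termination_by inp.toNat
decreasing_by
  · simp only [pyConvolution]; omega
  · simp only [pyConvolution]; omega

def get_convolutions (inp : Int) : (List (Int × Int × Int × Int)) × (List (Int × Int × Int)) :=
  aLoop inp [(3, 1, 1)] []

-- ===== PORT B =====
-- bin(m)[2:] of Source B: the binary digits of m, MSB first ('' for m = 0); exact port of
-- Python's bin for nonnegative m.
def pyBin (m : Nat) : List Char :=
  if m = 0 then [] else pyBin (m / 2) ++ [if m % 2 = 1 then '1' else '0']

def get_convolutions_alt (inp : Int) : (List (Int × Int × Int × Int)) × (List (Int × Int × Int)) :=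
  let bits : List Char := if inp > 1 then pyBin (inp - 1).toNat else []
  (bits.map (fun b => if b == '0' then ((3:Int), (2:Int), (1:Int), (0:Int)) else (3, 2, 1, 1)),
   (3, 1, 1) :: bits.reverse.map (fun b => if b == '0' then ((3:Int), (2:Int), (1:Int)) else (4, 2, 1)))

-- ===== PRECONDITION & SPEC =====
def Spec_get_convolutions (inp : Int) (out : (List (Int × Int × Int × Int)) × (List (Int × Int × Int))) : Prop := out = get_convolutions_alt inp
instance (inp : Int) (out : (List (Int × Int × Int × Int)) × (List (Int × Int × Int))) : Decidable (Spec_get_convolutions inp out) := by unfold Spec_get_convolutions; infer_instance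

-- ===== CLAIM (what is proved, stated in full; the proofs are below) =====
def Claim_equal_get_convolutions : Prop := ∀ (inp : Int), Dom_get_convolutions inp → Spec_get_convolutions inp (get_convolutions inp)

-- ===== LEMMAS AND PROOFS =====

-- the step-order odd flags of the loop = LSB-first bits of inp - 1, inverted
def lsbOdd (m : Nat) : List Bool :=
  if m = 0 then [] else (m % 2 == 0) :: lsbOdd (m / 2)

-- loop invariant: aLoop extends the accumulators by the per-flag tuples of lsbOdd (inp-1)
lemma aLoop_eq (inp : Int) (kd : List (Int × Int × Int)) (kg : List (Int × Int × Int × Int)) :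
    aLoop inp kd kg =
      ((kg ++ (lsbOdd (inp - 1).toNat).map
          (fun o => if o then ((3:Int), (2:Int), (1:Int), (0:Int)) else (3, 2, 1, 1))).reverse,
       kd ++ (lsbOdd (inp - 1).toNat).map
          (fun o => if o then ((3:Int), (2:Int), (1:Int)) else (4, 2, 1))) := by
  fun_induction aLoop inp kd kg with
  | case1 inp kd kg h hodd ih =>
      rw [lsbOdd.eq_def]
      have hm : (inp - 1).toNat ≠ 0 := by omega
      have hodd' : inp % 2 = 1 := by simpa using hodd
      have hbit : (inp - 1).toNat % 2 = 0 := by omega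
      have hnext : (pyConvolution inp (3, 2, 1) - 1).toNat = (inp - 1).toNat / 2 := by
        simp only [pyConvolution]; omega
      simp only [if_neg hm, hbit, hnext] at *
      simp at *
      simpa using ih
  | case2 inp kd kg h hodd ih =>
      rw [lsbOdd.eq_def]
      have hm : (inp - 1).toNat ≠ 0 := by omega
      have hodd' : inp % 2 = 0 := by
        have := Int.emod_two_eq inp; simp at hodd; omega
      have hbit : (inp - 1).toNat % 2 = 1 := by omega
      have hnext : (pyConvolution inp (4, 2, 1) - 1).toNat = (inp - 1).toNat / 2 := by
        simp only [pyConvolution]; omega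
      simp only [if_neg hm, hbit, hnext] at *
      simp at *
      simpa using ih
  | case3 inp kd kg h =>
      rw [lsbOdd.eq_def]
      have : (inp - 1).toNat = 0 := by omega
      simp [this]

-- pyBin is the reversed lsbOdd flags, encoded as characters ('0' where the step is odd)
lemma pyBin_eq (m : Nat) :
    pyBin m = ((lsbOdd m).map (fun o => if o then '0' else '1')).reverse := by
  fun_induction pyBin m
  · rw [lsbOdd.eq_def]; simp_all
  · rename_i n hn ih
    rw [lsbOdd.eq_def]
    rcases Nat.mod_two_eq_zero_or_one n with hb | hb <;> simp [hn, hb, ih]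

-- ===== VERDICT (by name: the statement is the Claim_ definition above) =====
theorem get_convolutions_spec : Claim_equal_get_convolutions := by
  intro inp _
  unfold Spec_get_convolutions get_convolutions get_convolutions_alt
  rw [aLoop_eq, pyBin_eq]
  by_cases h : inp > 1
  · simp only [if_pos h, List.map_reverse, List.reverse_reverse, List.map_map,
      Prod.mk.injEq, List.nil_append, List.cons_append,
      List.cons.injEq, true_and]
    refine ⟨?_, ?_⟩
    · congr 1; apply List.map_congr_left; intro o _; cases o <;> simp
    · apply List.map_congr_left; intro o _; cases o <;> simp
  · have : (inp - 1).toNat = 0 := by omega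
    rw [lsbOdd.eq_def]
    simp [h, this]
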